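-- pv_equiv track=rewrite | github.com/CREVOFFICIAL/algorithm | junyeong/programmers/12930.py | solution
-- ===== SOURCE A (Python) =====
-- def solution(s):
--     answer = ''
--     count = 0
--
--     for char in s:
--         if char.isalpha():
--             answer += char.upper() if count % 2 == 0 else char.lower()
--             count += 1
--         else:
--             answer += char
--             count = 0
--
--     return answer
-- ===== SOURCE B (Python) =====
-- def solution(s):
--     pieces = []
--     i = 0
--     n = len(s)
--     while i < n:
--         if s[i].isalpha():
--             j = i
--             while j < n and s[j].isalpha():
--                 j += 1
--             pieces.append(''.join(c.upper() if k % 2 == 0 else c.lower()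
--                                   for k, c in enumerate(s[i:j])))
--             i = j
--         else:
--             pieces.append(s[i])
--             i += 1
--     return ''.join(pieces)
-- ===== Notes on version B (the rewrite author's own statement) =====
-- stated objective: alternative
-- what changed: Replaces the flat per-character loop with a running parity counter that resets on non-letters by a run decomposition: scan maximal alphabetic runs, case each run by its within-run index, copy non-letters through.
import Mathlib
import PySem

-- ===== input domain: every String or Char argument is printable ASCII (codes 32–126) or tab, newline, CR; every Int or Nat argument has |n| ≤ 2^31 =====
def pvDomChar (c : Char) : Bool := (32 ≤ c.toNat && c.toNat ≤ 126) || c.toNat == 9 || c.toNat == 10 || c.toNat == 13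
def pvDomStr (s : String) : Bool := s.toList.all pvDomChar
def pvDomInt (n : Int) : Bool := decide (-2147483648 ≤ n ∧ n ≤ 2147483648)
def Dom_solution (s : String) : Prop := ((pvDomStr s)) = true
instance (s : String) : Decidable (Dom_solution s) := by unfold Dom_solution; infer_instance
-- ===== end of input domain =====

-- B replaces A's flat loop (running parity counter reset on non-letters) by a
-- maximal-alphabetic-run decomposition; alternative decomposition, same cost.

-- ===== PORT A =====
-- flat loop: answer accumulator plus a counter that resets on non-letters
def solution (s : String) : String :=
  let r := s.toList.foldl
    (fun (acc : List Char × Nat) c =>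
      if PySem.Chars.isalpha c then
        (acc.1 ++ [if acc.2 % 2 == 0 then PySem.Chars.upperChar c else PySem.Chars.lowerChar c],
         acc.2 + 1)
      else
        (acc.1 ++ [c], 0))
    ([], 0)
  String.mk r.1

-- ===== PORT B =====
-- case an alphabetic run by its within-run index (Source B's enumerate over s[i:j])
def caseRun (run : List Char) : List Char :=
  (PySem.List.enumerate run).map
    (fun p => if p.1 % 2 == 0 then PySem.Chars.upperChar p.2 else PySem.Chars.lowerChar p.2)

-- scan: take a maximal alphabetic run, or copy one non-letter through
def solutionAltGo : List Char → List Char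
  | [] => []
  | c :: rest =>
    if PySem.Chars.isalpha c then
      caseRun ((c :: rest).takeWhile PySem.Chars.isalpha)
        ++ solutionAltGo ((c :: rest).dropWhile PySem.Chars.isalpha)
    else
      c :: solutionAltGo rest
termination_by l => l.length
decreasing_by
  · simp only [List.dropWhile_cons, *, if_pos]
    calc (rest.dropWhile PySem.Chars.isalpha).length ≤ rest.length := List.length_dropWhile_le _ _
      _ < (c :: rest).length := by simp
  · simp

def solution_alt (s : String) : String := String.mk (solutionAltGo s.toList)

-- ===== PRECONDITION & SPEC =====
def Spec_solution (s : String) (out : String) : Prop := out = solution_alt s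
instance (s : String) (out : String) : Decidable (Spec_solution s out) := by unfold Spec_solution; infer_instance

-- ===== CLAIM (what is proved, stated in full; the proofs are below) =====
def Claim_equal_solution : Prop := ∀ (s : String), Dom_solution s → Spec_solution s (solution s)

-- ===== LEMMAS AND PROOFS =====

-- proof-side characterisation of A's loop result
def specA : List Char → Nat → List Char
  | [], _ => []
  | c :: rest, k =>
    if PySem.Chars.isalpha c then
      (if k % 2 == 0 then PySem.Chars.upperChar c else PySem.Chars.lowerChar c) :: specA rest (k + 1)
    else
      c :: specA rest 0

-- proof-side run mapper starting at index k
def mapFrom (k : Nat) : List Char → List Char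
  | [] => []
  | c :: cs =>
    (if k % 2 == 0 then PySem.Chars.upperChar c else PySem.Chars.lowerChar c) :: mapFrom (k + 1) cs

theorem foldA_eq (l : List Char) : ∀ (acc : List Char) (k : Nat),
    (l.foldl
      (fun (acc : List Char × Nat) c =>
        if PySem.Chars.isalpha c then
          (acc.1 ++ [if acc.2 % 2 == 0 then PySem.Chars.upperChar c else PySem.Chars.lowerChar c],
           acc.2 + 1)
        else
          (acc.1 ++ [c], 0)) (acc, k)).1 = acc ++ specA l k := by
  induction l with
  | nil => intro acc k; simp [specA]
  | cons c rest ih =>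
    intro acc k
    simp only [List.foldl_cons]
    cases h : PySem.Chars.isalpha c
    · rw [if_neg (by simp), ih]; simp [specA, h]
    · rw [if_pos rfl, ih]; simp [specA, h]

theorem caseRun_eq_mapFrom_aux (run : List Char) : ∀ (k : Nat),
    (PySem.List.enumerate run (k : Int)).map
      (fun p => if p.1 % 2 == 0 then PySem.Chars.upperChar p.2 else PySem.Chars.lowerChar p.2)
      = mapFrom k run := by
  induction run with
  | nil => intro k; rw [PySem.List.enumerate_nil]; rfl
  | cons c cs ih =>
    intro k
    have hk : ((k : Int) % 2 == 0) = (k % 2 == 0) := by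
      rcases Nat.even_or_odd k with ⟨m, hm⟩ | ⟨m, hm⟩ <;> subst hm <;> simp <;> omega
    have h1 : ((k : Int) + 1) = ((k + 1 : Nat) : Int) := by push_cast; ring
    rw [PySem.List.enumerate_cons, List.map_cons, h1, ih]
    simp only [mapFrom, hk]

theorem caseRun_eq_mapFrom (run : List Char) : caseRun run = mapFrom 0 run := by
  unfold caseRun
  exact caseRun_eq_mapFrom_aux run 0

theorem specA_run (l : List Char) : ∀ (k : Nat),
    specA l k = mapFrom k (l.takeWhile PySem.Chars.isalpha)
      ++ specA (l.dropWhile PySem.Chars.isalpha) 0 := by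
  induction l with
  | nil => intro k; simp [specA, mapFrom]
  | cons c rest ih =>
    intro k
    by_cases h : PySem.Chars.isalpha c = true
    · simp [specA, h, mapFrom, ih]
    · have h' : PySem.Chars.isalpha c = false := by simpa using h
      simp [specA, h', mapFrom]

theorem go_eq_specA (l : List Char) : solutionAltGo l = specA l 0 := by
  induction hn : l.length using Nat.strong_induction_on generalizing l with
  | _ n ih =>
    subst hn
    cases l with
    | nil => simp [solutionAltGo, specA]
    | cons c rest =>
      by_cases h : PySem.Chars.isalpha c = true
      · rw [solutionAltGo.eq_def]
        simp only [if_pos h]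
        rw [caseRun_eq_mapFrom, specA_run]
        congr 1
        have hlen : ((c :: rest).dropWhile PySem.Chars.isalpha).length < (c :: rest).length := by
          simp only [List.dropWhile_cons, h, if_pos]
          calc (rest.dropWhile PySem.Chars.isalpha).length ≤ rest.length :=
              List.length_dropWhile_le _ _
            _ < (c :: rest).length := by simp
        exact ih _ hlen _ rfl
      · have h' : PySem.Chars.isalpha c = false := by simpa using h
        rw [solutionAltGo.eq_def]
        simp only [h', Bool.false_eq_true, if_false, specA]
        exact congrArg _ (ih rest.length (by simp) rest rfl)

-- ===== VERDICT (by name: the statement is the Claim_ definition above) =====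
theorem solution_spec : Claim_equal_solution := by
  intro s _
  show solution s = solution_alt s
  unfold solution solution_alt
  simp only [foldA_eq, go_eq_specA, List.nil_append]
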